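-- pv_equiv track=rewrite | github.com/skanjila/beautiful_dsa_algos_coding_interviews | beautiful_dsa_algos_coding_interviews/math/matrix_antidiagonals.py | get_antidiagonals
-- ===== SOURCE A (Python) =====
-- def get_antidiagonals(matrix):
--     """
--     Computes the antidiagonals of a given matrix.
--
--     Antidiagonals run from the bottom-left to the top-right.
--
--     Args:
--         matrix: A 2D list representing the matrix.
--
--     Returns:
--         A list of lists, where each inner list represents an antidiagonal.
--         Returns an empty list if the input matrix is empty.
--     """
--     if not matrix or not matrix[0]:
--         return []
--
--     rows = len(matrix)
--     cols = len(matrix[0])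
--     # The number of antidiagonals is (rows + cols - 1).
--     # Initialize a list of lists to store the antidiagonals.
--     antidiagonals = [[] for _ in range(rows + cols - 1)]
--
--     # Iterate through each element of the matrix.
--     for r in range(rows):
--         for c in range(cols):
--             # The sum of the row and column indices (r + c) is constant for each antidiagonal.
--             # This sum is used as the index for the antidiagonals list.
--             antidiagonals[r + c].append(matrix[r][c])
--
--     return antidiagonals
-- ===== SOURCE B (Python) =====
-- def get_antidiagonals(matrix):
--     if not matrix or not matrix[0]:
--         return []
--     rows, cols = len(matrix), len(matrix[0])
--     out = []
--     for d in range(rows + cols - 1):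
--         lo = max(0, d - cols + 1)
--         hi = min(d, rows - 1)
--         out.append([matrix[r][d - r] for r in range(lo, hi + 1)])
--     return out
-- ===== Notes on version B (the rewrite author's own statement) =====
-- stated objective: alternative
-- what changed: Replaces A's row-major double loop that appends into pre-allocated buckets indexed by r+c with a direct diagonal-by-diagonal construction: for each diagonal index d it emits [matrix[r][d-r] for r in the computed bounds], so no bucket list is pre-allocated or mutated.
import Mathlib
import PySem

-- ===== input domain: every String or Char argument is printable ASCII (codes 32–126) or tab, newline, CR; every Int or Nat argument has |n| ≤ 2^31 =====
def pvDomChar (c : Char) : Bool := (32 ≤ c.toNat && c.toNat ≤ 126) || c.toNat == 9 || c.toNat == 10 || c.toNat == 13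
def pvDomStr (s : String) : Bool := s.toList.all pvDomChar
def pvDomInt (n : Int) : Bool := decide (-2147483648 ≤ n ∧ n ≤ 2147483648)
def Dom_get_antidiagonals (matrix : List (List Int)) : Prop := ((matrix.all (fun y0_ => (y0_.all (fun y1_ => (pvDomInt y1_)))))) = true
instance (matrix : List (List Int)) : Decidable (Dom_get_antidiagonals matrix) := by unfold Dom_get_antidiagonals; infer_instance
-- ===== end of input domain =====

-- B replaces A's row-major double loop bucketing by r+c with a direct diagonal-by-diagonal
-- construction (objective: alternative decomposition, same cost).
-- shared indexing helper: matrix[r][c] (in-range inside Pre_; getD 0 only pads the out-of-Pre_ case)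
def pvElt (matrix : List (List Int)) (r c : Nat) : Int :=
  ((PySem.List.pyGet? matrix (r : Int)).bind (fun row => PySem.List.pyGet? row (c : Int))).getD 0

-- ===== PORT A =====
def get_antidiagonals (matrix : List (List Int)) : List (List Int) :=
  if matrix = [] ∨ matrix.headD [] = [] then []
  else
    let rows := matrix.length
    let cols := (matrix.headD []).length
    let antidiagonals : List (List Int) := List.replicate (rows + cols - 1) []
    (List.range rows).foldl (fun st r =>
      (List.range cols).foldl (fun st c =>
        st.modify (r + c) (fun l => l ++ [pvElt matrix r c])) st) antidiagonals

-- ===== PORT B =====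
def get_antidiagonals_alt (matrix : List (List Int)) : List (List Int) :=
  if matrix = [] ∨ matrix.headD [] = [] then []
  else
    let rows := matrix.length
    let cols := (matrix.headD []).length
    (List.range (rows + cols - 1)).map (fun d =>
      let lo := d + 1 - cols          -- max(0, d - cols + 1) via Nat truncation
      let hi := min d (rows - 1)
      (List.range' lo (hi + 1 - lo)).map (fun r => pvElt matrix r (d - r)))

-- ===== PRECONDITION & SPEC =====
-- Pre_ excludes exactly the ragged matrices in which some row is shorter than row 0:
-- there the Python A raises IndexError (and so does Python B).
def Pre_get_antidiagonals (matrix : List (List Int)) : Prop :=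
  matrix = [] ∨ matrix.headD [] = [] ∨
    ∀ row ∈ matrix, (matrix.headD []).length ≤ row.length
instance (matrix : List (List Int)) : Decidable (Pre_get_antidiagonals matrix) := by
  unfold Pre_get_antidiagonals; infer_instance
def pvWitness_get_antidiagonals : List (List Int) := [[1, 2, 3], [4, 5, 6]]

def Spec_get_antidiagonals (matrix : List (List Int)) (out : List (List Int)) : Prop := out = get_antidiagonals_alt matrix
instance (matrix : List (List Int)) (out : List (List Int)) : Decidable (Spec_get_antidiagonals matrix out) := by unfold Spec_get_antidiagonals; infer_instance

-- ===== CLAIM (what is proved, stated in full; the proofs are below) =====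
def Claim_equal_get_antidiagonals : Prop := ∀ (matrix : List (List Int)), Dom_get_antidiagonals matrix → Pre_get_antidiagonals matrix → Spec_get_antidiagonals matrix (get_antidiagonals matrix)

-- ===== LEMMAS AND PROOFS =====

-- bucket d after the first k rows of A's outer loop (also B's sublist at k = rows)
def pvSeg (matrix : List (List Int)) (cols k d : Nat) : List Int :=
  (List.range' (d + 1 - cols) (min (d + 1) k - (d + 1 - cols))).map
    (fun r => pvElt matrix r (d - r))

theorem pv_map_range_modify (n i : Nat) (f : Nat → List Int) (g : List Int → List Int) :
    ((List.range n).map f).modify i g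
      = (List.range n).map (fun d => if d = i then g (f d) else f d) := by
  apply List.ext_getElem?
  intro j
  simp only [List.getElem?_modify, List.getElem?_map]
  by_cases h : j < n
  · simp [h]
    by_cases hij : i = j
    · simp [hij]
    · simp [hij]
      intro h'
      exact absurd h'.symm hij
  · simp [h]

theorem pv_inner (matrix : List (List Int)) (n r : Nat) (f : Nat → List Int) (j : Nat) :
    (List.range j).foldl (fun st c => st.modify (r + c) (fun l => l ++ [pvElt matrix r c]))
        ((List.range n).map f)
      = (List.range n).map
          (fun d => f d ++ (if r ≤ d ∧ d < r + j then [pvElt matrix r (d - r)] else [])) := by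
  induction j with
  | zero => simp
  | succ j ih =>
    rw [List.range_succ, List.foldl_append, ih]
    simp only [List.foldl_cons, List.foldl_nil]
    rw [pv_map_range_modify]
    apply List.map_congr_left
    intro d _
    by_cases hd : d = r + j
    · subst hd
      have h1 : ¬ (r ≤ r + j ∧ r + j < r + j) := by omega
      have h2 : r ≤ r + j ∧ r + j < r + (j + 1) := by omega
      simp [h2]
    · simp only [if_neg hd]
      by_cases h1 : r ≤ d ∧ d < r + j
      · have h2 : r ≤ d ∧ d < r + (j + 1) := by omega
        simp [h2]
        omega
      · have h2 : ¬ (r ≤ d ∧ d < r + (j + 1)) := by omega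
        simp [h1, h2]

theorem pv_seg_succ (matrix : List (List Int)) (cols k d : Nat) (hc : 1 ≤ cols) :
    pvSeg matrix cols (k + 1) d
      = pvSeg matrix cols k d ++
          (if k ≤ d ∧ d < k + cols then [pvElt matrix k (d - k)] else []) := by
  unfold pvSeg
  by_cases h : k ≤ d ∧ d < k + cols
  · have hlo : d + 1 - cols ≤ k := by omega
    have h1 : min (d + 1) k = k := by omega
    have h2 : min (d + 1) (k + 1) = k + 1 := by omega
    have h3 : k + 1 - (d + 1 - cols) = (k - (d + 1 - cols)) + 1 := by omega
    rw [h1, h2, h3, List.range'_concat, List.map_append]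
    have h4 : d + 1 - cols + (k - (d + 1 - cols)) = k := by omega
    simp [h4, h]
  · rw [if_neg h, List.append_nil]
    have h1 : min (d + 1) (k + 1) - (d + 1 - cols) = min (d + 1) k - (d + 1 - cols) := by omega
    rw [h1]

theorem pv_outer (matrix : List (List Int)) (rows cols : Nat) (hc : 1 ≤ cols) (k : Nat) :
    (List.range k).foldl (fun st r =>
        (List.range cols).foldl (fun st c =>
          st.modify (r + c) (fun l => l ++ [pvElt matrix r c])) st)
      (List.replicate (rows + cols - 1) [])
      = (List.range (rows + cols - 1)).map (pvSeg matrix cols k) := by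
  induction k with
  | zero =>
    have : (List.range (rows + cols - 1)).map (pvSeg matrix cols 0)
        = (List.range (rows + cols - 1)).map (fun _ => ([] : List Int)) := by
      apply List.map_congr_left; intro d _; simp [pvSeg]
    rw [this, List.map_const', List.length_range]
    simp
  | succ k ih =>
    rw [List.range_succ, List.foldl_append, ih]
    simp only [List.foldl_cons, List.foldl_nil]
    rw [pv_inner]
    apply List.map_congr_left
    intro d _
    exact (pv_seg_succ matrix cols k d hc).symm

-- ===== VERDICT (by name: the statement is the Claim_ definition above) =====
theorem get_antidiagonals_spec : Claim_equal_get_antidiagonals := by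
  intro matrix _ _
  unfold Spec_get_antidiagonals get_antidiagonals get_antidiagonals_alt
  by_cases hg : matrix = [] ∨ matrix.headD [] = []
  · simp only [List.headD_eq_head?_getD] at hg
    simp [hg]
  · rw [if_neg hg, if_neg hg]
    have hrows : 1 ≤ matrix.length := by
      rcases matrix with _ | ⟨a, l⟩
      · exact absurd (Or.inl rfl) hg
      · simp
    have hcols : 1 ≤ (matrix.headD []).length := by
      rcases h0 : matrix.headD [] with _ | ⟨a, l⟩
      · exact absurd (Or.inr h0) hg
      · simp
    rw [pv_outer matrix matrix.length (matrix.headD []).length hcols]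
    apply List.map_congr_left
    intro d _
    unfold pvSeg
    show List.map (fun r => pvElt matrix r (d - r))
          (List.range' (d + 1 - (matrix.headD []).length)
            (min (d + 1) matrix.length - (d + 1 - (matrix.headD []).length)))
        = List.map (fun r => pvElt matrix r (d - r))
          (List.range' (d + 1 - (matrix.headD []).length)
            (min d (matrix.length - 1) + 1 - (d + 1 - (matrix.headD []).length)))
    have h5 : min d (matrix.length - 1) + 1 - (d + 1 - (matrix.headD []).length)
        = min (d + 1) matrix.length - (d + 1 - (matrix.headD []).length) := by omega
    rw [h5]
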